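-- pv_equiv track=rewrite | github.com/Babak-khezri/blog | extensions/utils.py | persian_numbers_converter
-- ===== SOURCE A (Python) =====
-- def persian_numbers_converter(mystr):
--     numbers = {
--         "0": "۰",
--         "1": "۱",
--         "2": "۲",
--         "3": "۳",
--         "4": "۴",
--         "5": "۵",
--         "6": "۶",
--         "7": "۷",
--         "8": "۸",
--         "9": "۹",
--     }
--     for english_num, persian_num in numbers.items():
--         mystr = mystr.replace(english_num, persian_num)
--     return mystr
-- ===== SOURCE B (Python) =====
-- def persian_numbers_converter(mystr):
--     # Arithmetic mapping: Persian digits are a contiguous Unicode block starting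
--     # at U+06F0, so each ASCII digit maps by a fixed code-point offset; no dict.
--     out = []
--     for c in mystr:
--         if '0' <= c <= '9':
--             out.append(chr(0x06F0 + ord(c) - 0x30))
--         else:
--             out.append(c)
--     return ''.join(out)
-- ===== Notes on version B (the rewrite author's own statement) =====
-- stated objective: alternative
-- what changed: Instead of ten sequential whole-string .replace() passes over a dict of digit pairs, B drops the dict entirely and makes one left-to-right pass, converting each ASCII digit by the fixed code-point offset chr(0x06F0 + ord(c) - 0x30) (Persian digits are a contiguous Unicode block) and copying every other character.
import Mathlib
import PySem

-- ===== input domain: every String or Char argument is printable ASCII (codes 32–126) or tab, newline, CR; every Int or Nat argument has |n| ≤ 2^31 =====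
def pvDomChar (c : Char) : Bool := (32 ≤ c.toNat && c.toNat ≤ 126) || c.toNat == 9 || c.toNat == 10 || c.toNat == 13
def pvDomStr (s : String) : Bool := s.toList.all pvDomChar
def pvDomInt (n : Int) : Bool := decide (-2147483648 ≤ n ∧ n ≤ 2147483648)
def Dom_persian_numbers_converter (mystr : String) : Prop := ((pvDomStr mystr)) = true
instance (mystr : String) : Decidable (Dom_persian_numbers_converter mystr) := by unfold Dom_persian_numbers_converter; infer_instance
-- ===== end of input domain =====

-- B replaces A's ten sequential whole-string .replace passes over a digit dict with one
-- left-to-right pass converting each ASCII digit by a fixed code-point offset (no dict;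
-- objective: alternative single-pass arithmetic decomposition).


-- ===== PORT A =====
-- the digit dict A builds literally
def pnNumbers : PySem.Dict String String := PySem.Dict.ofList
  [("0","۰"),("1","۱"),("2","۲"),("3","۳"),("4","۴"),("5","۵"),("6","۶"),("7","۷"),("8","۸"),("9","۹")]

def persian_numbers_converter (mystr : String) : String :=
  pnNumbers.items.foldl (fun s p => PySem.Str.replace s p.1 p.2) mystr

-- ===== PORT B =====
-- B's loop body: append one piece per character, digits converted by the fixed offset
def persian_numbers_converter_alt (mystr : String) : String :=
  PySem.Str.join ""
    (mystr.toList.foldl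
      (fun out c =>
        if '0' ≤ c ∧ c ≤ '9' then out ++ [String.ofList [Char.ofNat (0x06F0 + c.toNat - 0x30)]]
        else out ++ [String.ofList [c]])
      [])

-- ===== PRECONDITION & SPEC =====
def Spec_persian_numbers_converter (mystr : String) (out : String) : Prop := out = persian_numbers_converter_alt mystr
instance (mystr : String) (out : String) : Decidable (Spec_persian_numbers_converter mystr out) := by unfold Spec_persian_numbers_converter; infer_instance

-- ===== CLAIM (what is proved, stated in full; the proofs are below) =====
def Claim_equal_persian_numbers_converter : Prop := ∀ (mystr : String), Dom_persian_numbers_converter mystr → Spec_persian_numbers_converter mystr (persian_numbers_converter mystr)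

-- ===== LEMMAS AND PROOFS =====

-- the per-character substitution both programs compute
def pnG (c : Char) : Char :=
  if c = '0' then '۰' else if c = '1' then '۱' else if c = '2' then '۲' else
  if c = '3' then '۳' else if c = '4' then '۴' else if c = '5' then '۵' else
  if c = '6' then '۶' else if c = '7' then '۷' else if c = '8' then '۸' else
  if c = '9' then '۹' else c

theorem go_single (a b : Char) : ∀ (fuel : Nat) (l acc : List Char), l.length ≤ fuel →
    PySem.Chars.replace.go [a] [b] fuel l acc
      = acc.reverse ++ l.map (fun c => if c = a then b else c) := by
  intro fuel
  induction fuel with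
  | zero => intro l acc h; cases l with
    | nil => simp [PySem.Chars.replace.go]
    | cons c t => simp at h
  | succ n ih =>
    intro l acc h
    cases l with
    | nil => simp [PySem.Chars.replace.go]
    | cons c t =>
      rw [PySem.Chars.replace.go]
      by_cases hc : c = a
      · simp [hc, List.isPrefixOf, ih t (b :: acc) (by simpa using h)]
      · have hpre : [a].isPrefixOf (c :: t) = false := by
          simp [List.isPrefixOf]
          intro hh; exact hc hh.symm
        simp [hpre, ih t (c :: acc) (by simpa using h), hc]

theorem replace_single (a b : Char) (cs : List Char) :
    PySem.Chars.replace cs [a] [b] = cs.map (fun c => if c = a then b else c) := by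
  rw [PySem.Chars.replace]
  simp [go_single a b cs.length cs [] le_rfl]

theorem join_singletons (l : List Char) :
    PySem.Str.join "" (l.map (fun c => String.ofList [c])) = String.ofList l := by
  have h : (PySem.Str.join "" (l.map (fun c => String.ofList [c]))).toList = l := by
    rw [PySem.Str.toList_join]
    simp [List.map_map, Function.comp_def]
  have h2 := congrArg String.ofList h
  rw [String.ofList_toList] at h2
  exact h2

-- B's fold over an append-accumulator is the map of its per-character piece
theorem foldl_append_pieces (f : Char → String) :
    ∀ (l : List Char) (init : List String),
      l.foldl (fun out c => out ++ [f c]) init = init ++ l.map f := by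
  intro l
  induction l with
  | nil => simp
  | cons c t ih => intro init; simp [List.foldl_cons, ih]

-- B's per-character piece is pnG
theorem piece_eq (c : Char) :
    (if '0' ≤ c ∧ c ≤ '9' then String.ofList [Char.ofNat (0x06F0 + c.toNat - 0x30)]
     else String.ofList [c]) = String.ofList [pnG c] := by
  by_cases h0 : c = '0'; · subst h0; rfl
  by_cases h1 : c = '1'; · subst h1; rfl
  by_cases h2 : c = '2'; · subst h2; rfl
  by_cases h3 : c = '3'; · subst h3; rfl
  by_cases h4 : c = '4'; · subst h4; rfl
  by_cases h5 : c = '5'; · subst h5; rfl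
  by_cases h6 : c = '6'; · subst h6; rfl
  by_cases h7 : c = '7'; · subst h7; rfl
  by_cases h8 : c = '8'; · subst h8; rfl
  by_cases h9 : c = '9'; · subst h9; rfl
  have hd : ¬ ('0' ≤ c ∧ c ≤ '9') := by
    rintro ⟨hl, hr⟩
    have hl' : (48 : Nat) ≤ c.toNat := hl
    have hr' : c.toNat ≤ 57 := hr
    have hc : c = Char.ofNat c.toNat := (Char.ofNat_toNat c).symm
    interval_cases h : c.toNat
    · exact h0 (by rw [hc])
    · exact h1 (by rw [hc])
    · exact h2 (by rw [hc])
    · exact h3 (by rw [hc])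
    · exact h4 (by rw [hc])
    · exact h5 (by rw [hc])
    · exact h6 (by rw [hc])
    · exact h7 (by rw [hc])
    · exact h8 (by rw [hc])
    · exact h9 (by rw [hc])
  rw [if_neg hd]
  simp only [pnG, if_neg h0, if_neg h1, if_neg h2, if_neg h3, if_neg h4, if_neg h5,
    if_neg h6, if_neg h7, if_neg h8, if_neg h9]

theorem alt_eq (s : String) :
    persian_numbers_converter_alt s = String.ofList (s.toList.map pnG) := by
  rw [persian_numbers_converter_alt]
  have hb : (fun (out : List String) (c : Char) =>
      if '0' ≤ c ∧ c ≤ '9' then out ++ [String.ofList [Char.ofNat (0x06F0 + c.toNat - 0x30)]]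
      else out ++ [String.ofList [c]])
      = fun out c => out ++ [String.ofList [pnG c]] := by
    funext out c
    rw [← piece_eq c]
    split <;> rfl
  rw [hb, foldl_append_pieces, List.nil_append]
  rw [show (s.toList.map fun c => String.ofList [pnG c]) = (s.toList.map pnG).map (fun c => String.ofList [c]) by
        simp [List.map_map, Function.comp_def]]
  exact join_singletons (s.toList.map pnG)

theorem str_replace_single (s : String) (a b : Char) :
    PySem.Str.replace s (String.ofList [a]) (String.ofList [b])
      = String.ofList (s.toList.map (fun c => if c = a then b else c)) := by
  rw [PySem.Str.replace, String.toList_ofList, String.toList_ofList, replace_single]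

theorem maps_eq (l : List Char) :
    (((((((((l.map (fun x => if x='0' then '۰' else x)).map (fun x => if x='1' then '۱' else x)).map (fun x => if x='2' then '۲' else x)).map (fun x => if x='3' then '۳' else x)).map (fun x => if x='4' then '۴' else x)).map (fun x => if x='5' then '۵' else x)).map (fun x => if x='6' then '۶' else x)).map (fun x => if x='7' then '۷' else x)).map (fun x => if x='8' then '۸' else x)).map (fun x => if x='9' then '۹' else x) = l.map pnG := by
  induction l with
  | nil => rfl
  | cons a t ih =>
    simp only [List.map_cons]
    refine congrArg₂ List.cons ?_ ih
    by_cases h0 : a = '0'; · subst h0; rfl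
    by_cases h1 : a = '1'; · subst h1; rfl
    by_cases h2 : a = '2'; · subst h2; rfl
    by_cases h3 : a = '3'; · subst h3; rfl
    by_cases h4 : a = '4'; · subst h4; rfl
    by_cases h5 : a = '5'; · subst h5; rfl
    by_cases h6 : a = '6'; · subst h6; rfl
    by_cases h7 : a = '7'; · subst h7; rfl
    by_cases h8 : a = '8'; · subst h8; rfl
    by_cases h9 : a = '9'; · subst h9; rfl
    simp only [pnG, if_neg h0, if_neg h1, if_neg h2, if_neg h3, if_neg h4, if_neg h5, if_neg h6, if_neg h7, if_neg h8, if_neg h9]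

theorem a_eq (s : String) :
    persian_numbers_converter s = String.ofList (s.toList.map pnG) := by
  rw [persian_numbers_converter]
  show (PySem.Str.replace (PySem.Str.replace (PySem.Str.replace (PySem.Str.replace (PySem.Str.replace (PySem.Str.replace (PySem.Str.replace (PySem.Str.replace (PySem.Str.replace (PySem.Str.replace s "0" "\u06f0") "1" "\u06f1") "2" "\u06f2") "3" "\u06f3") "4" "\u06f4") "5" "\u06f5") "6" "\u06f6") "7" "\u06f7") "8" "\u06f8") "9" "\u06f9") = _
  rw [show ("0":String) = String.ofList ['0'] from rfl, show ("1":String) = String.ofList ['1'] from rfl, show ("2":String) = String.ofList ['2'] from rfl, show ("3":String) = String.ofList ['3'] from rfl, show ("4":String) = String.ofList ['4'] from rfl, show ("5":String) = String.ofList ['5'] from rfl, show ("6":String) = String.ofList ['6'] from rfl, show ("7":String) = String.ofList ['7'] from rfl, show ("8":String) = String.ofList ['8'] from rfl, show ("9":String) = String.ofList ['9'] from rfl]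
  rw [show ("\u06f0":String) = String.ofList ['\u06f0'] from rfl, show ("\u06f1":String) = String.ofList ['\u06f1'] from rfl, show ("\u06f2":String) = String.ofList ['\u06f2'] from rfl, show ("\u06f3":String) = String.ofList ['\u06f3'] from rfl, show ("\u06f4":String) = String.ofList ['\u06f4'] from rfl, show ("\u06f5":String) = String.ofList ['\u06f5'] from rfl, show ("\u06f6":String) = String.ofList ['\u06f6'] from rfl, show ("\u06f7":String) = String.ofList ['\u06f7'] from rfl, show ("\u06f8":String) = String.ofList ['\u06f8'] from rfl, show ("\u06f9":String) = String.ofList ['\u06f9'] from rfl]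
  simp only [str_replace_single, String.toList_ofList]
  exact congrArg String.ofList (maps_eq s.toList)

-- ===== VERDICT (by name: the statement is the Claim_ definition above) =====
theorem persian_numbers_converter_spec : Claim_equal_persian_numbers_converter := by
  intro s _
  unfold Spec_persian_numbers_converter
  rw [a_eq, alt_eq]
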